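-- pv_equiv track=rewrite | github.com/SupporterDog/Code_Study_Reports | basic_programming/hw3/202011047_hw3.2.py | decompress_img
-- ===== SOURCE A (Python) =====
-- def decompress_img(compressed_img):                                     #함수를 정의한다
--     finallist=[]                                                        #finallist라는 빈 리스트를 만든다.
--     for i in range(len(compressed_img)):                                #주어진 것에 인수 개수만큼 반복시킨다
--         newlist=[]                                                      #새로운 리스트 newlist를 만든다.
--         if compressed_img[0]==0:                                        #1로 시작하여 처음의 리스트값이 0이 나왔을 경우,
--             for j in range(len(compressed_img[i])):                     #또한 여기의 i번째 인수의 개수만큼 j를 또 돌린다.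
--                 if j%2==0:                                              #j가 2의 배수이면, 전부 다 1에 관련이 있으므로, 써져 있는 숫자만큼 1을 리스트에 append한다. (77~79)
--                     for k in range(compressed_img[i][j]):
--                         newlist.append(1)
--                 else:
--                     for k in range(compressed_img[i][j]):               #그 외일 때는 0에 관련되므로, 반복시켜 0을 리스트에 append시킨다 (80~82)
--                         newlist.append(0)
--
--         else:                                                           #원래 0으로 시작해서 지금 받은 리스트에서는 1이상의 값이 나온 경우
--             for j in range(len(compressed_img[i])):                     #주어진 것에 인수 개수만큼 반복시킨다.
--                 if j%2==0:                                              #이번에는 j가 2로 나누어떨어질 때, j번째 수는 0이 연속된 개수이므로 써져 있는 숫자만큼 0을 append한다.(86~88)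
--                     for k in range(compressed_img[i][j]):
--                         newlist.append(0)
--                 else:
--                     for k in range(compressed_img[i][j]):               #짝수가 아닐 때에는 1을 append한다(90~92)
--                         newlist.append(1)
--         finallist.append(newlist)                                       #newlist를 finallist에 넣는다.
--     return finallist                                                    #finallist를 반환한다.
-- ===== SOURCE B (Python) =====
-- def decompress_img(compressed_img):
--     # Each row lists run lengths of 0s at even positions and of 1s at odd positions
--     # (A's `compressed_img[0]==0` compares a list with an int, which is always False,
--     # so A always takes its 0-first branch).  Decode by splitting the row into the
--     # two stride-2 slices and zipping them (the 1-run list padded with a final 0),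
--     # emitting each (zero-run, one-run) pair at once.
--     result = []
--     for row in compressed_img:
--         out = []
--         for z, o in zip(row[0::2], row[1::2] + [0]):
--             out += [0] * z + [1] * o
--         result.append(out)
--     return result
-- ===== Notes on version B (the rewrite author's own statement) =====
-- stated objective: alternative
-- what changed: Instead of A's index-parity branching inside nested range/index loops (one branch dead, since its guard compares a list with the int 0 and is always False), B splits each row into the stride-2 slices row[0::2] (zero-run lengths) and row[1::2] (one-run lengths, padded with a trailing 0), zips them, and emits each (zero-run, one-run) pair at once.
import Mathlib
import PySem

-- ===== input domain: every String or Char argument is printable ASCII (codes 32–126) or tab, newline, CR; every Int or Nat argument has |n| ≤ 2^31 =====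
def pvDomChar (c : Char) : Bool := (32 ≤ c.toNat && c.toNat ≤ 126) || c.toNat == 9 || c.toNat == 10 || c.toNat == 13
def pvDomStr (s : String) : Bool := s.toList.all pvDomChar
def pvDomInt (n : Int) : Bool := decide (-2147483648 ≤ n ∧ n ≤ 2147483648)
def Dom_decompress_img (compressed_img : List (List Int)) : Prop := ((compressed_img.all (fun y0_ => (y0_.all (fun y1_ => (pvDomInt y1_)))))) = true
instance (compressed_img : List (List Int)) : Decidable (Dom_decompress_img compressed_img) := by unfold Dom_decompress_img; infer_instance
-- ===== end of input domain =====

-- B: A's two symmetric index-parity branches (one dead: its guard compares a list to the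
-- int 0, always False in Python) are replaced by splitting each row into its stride-2
-- slices and zipping them (one-runs padded with a 0) — a different decomposition, same cost.


-- ===== PORT A =====
-- Python's `compressed_img[0] == 0` compares a list with an int: always False (exact).
def pyListEqIntZero (_x : List Int) : Bool := false

def decompress_img (compressed_img : List (List Int)) : List (List Int) :=
  (PySem.List.pyRange 0 compressed_img.length 1).foldl (fun finallist i =>
    let row := PySem.List.pyGetD compressed_img i []
    let newlist : List Int :=
      if pyListEqIntZero (PySem.List.pyGetD compressed_img 0 []) then
        (PySem.List.pyRange 0 row.length 1).foldl (fun nl j =>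
          if j % 2 == 0 then
            (PySem.List.pyRange 0 (PySem.List.pyGetD row j 0) 1).foldl
              (fun l _ => l ++ [(1 : Int)]) nl
          else
            (PySem.List.pyRange 0 (PySem.List.pyGetD row j 0) 1).foldl
              (fun l _ => l ++ [(0 : Int)]) nl) []
      else
        (PySem.List.pyRange 0 row.length 1).foldl (fun nl j =>
          if j % 2 == 0 then
            (PySem.List.pyRange 0 (PySem.List.pyGetD row j 0) 1).foldl
              (fun l _ => l ++ [(0 : Int)]) nl
          else
            (PySem.List.pyRange 0 (PySem.List.pyGetD row j 0) 1).foldl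
              (fun l _ => l ++ [(1 : Int)]) nl) []
    finallist ++ [newlist]) []

-- ===== PORT B =====
-- Hand ports of the stride-2 slices row[0::2] and row[1::2] (PySem.List.slice has no step):
-- exact — they take every second element starting at index 0 resp. 1.
def pyEvens : List Int → List Int
  | [] => []
  | [c] => [c]
  | c :: _ :: r => c :: pyEvens r

def pyOdds : List Int → List Int
  | [] => []
  | [_] => []
  | _ :: c :: r => c :: pyOdds r

def decompress_img_alt (compressed_img : List (List Int)) : List (List Int) :=
  compressed_img.map (fun row =>
    ((pyEvens row).zip (pyOdds row ++ [(0 : Int)])).foldl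
      (fun out p => out ++ (List.replicate p.1.toNat 0 ++ List.replicate p.2.toNat 1)) [])

-- ===== PRECONDITION & SPEC =====
def Spec_decompress_img (compressed_img : List (List Int)) (out : List (List Int)) : Prop := out = decompress_img_alt compressed_img
instance (compressed_img : List (List Int)) (out : List (List Int)) : Decidable (Spec_decompress_img compressed_img out) := by unfold Spec_decompress_img; infer_instance

-- ===== CLAIM (what is proved, stated in full; the proofs are below) =====
def Claim_equal_decompress_img : Prop := ∀ (compressed_img : List (List Int)), Dom_decompress_img compressed_img → Spec_decompress_img compressed_img (decompress_img compressed_img)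

-- ===== LEMMAS AND PROOFS =====

-- Reference decoding: replicate each count with the current bit, toggling it.
def rleSpec : List Int → Int → List Int
  | [], _ => []
  | c :: cs, v => List.replicate c.toNat v ++ rleSpec cs (1 - v)

-- A's innermost loop ('for k in range(c): newlist.append(v)') appends c copies of v.
theorem innerA_eq (c : Int) (nl : List Int) (v : Int) :
    (PySem.List.pyRange 0 c 1).foldl (fun l _ => l ++ [v]) nl = nl ++ List.replicate c.toNat v := by
  rw [PySem.List.foldl_append_singleton_eq_map]
  congr 1
  rw [List.map_const']
  simp [PySem.List.length_pyRange_one]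

theorem rleSpec_append_singleton (ys : List Int) (c v : Int) :
    rleSpec (ys ++ [c]) v
      = rleSpec ys v ++ List.replicate c.toNat (if ys.length % 2 = 0 then v else 1 - v) := by
  induction ys generalizing v with
  | nil => simp [rleSpec]
  | cons y ys ih =>
    simp only [List.cons_append, rleSpec, ih (1 - v), List.append_assoc]
    congr 2
    by_cases h : ys.length % 2 = 0 <;>
      · simp [h]
        right; intro hcon; exfalso; omega

-- A's row loop (the live 'else' branch) computes rleSpec row 0.
theorem rowA_eq (row : List Int) :
    (PySem.List.pyRange 0 (row.length : Int) 1).foldl (fun nl j =>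
        if j % 2 == 0 then
          (PySem.List.pyRange 0 (PySem.List.pyGetD row j 0) 1).foldl
            (fun l _ => l ++ [(0 : Int)]) nl
        else
          (PySem.List.pyRange 0 (PySem.List.pyGetD row j 0) 1).foldl
            (fun l _ => l ++ [(1 : Int)]) nl) []
      = rleSpec row 0 := by
  induction row using List.reverseRecOn with
  | nil => simp [PySem.List.pyRange_one_eq_nil, rleSpec]
  | append_singleton ys c ih =>
    have hlen : ((ys ++ [c]).length : Int) = (ys.length : Int) + 1 := by
      simp
    rw [hlen, PySem.List.pyRange_one_succ_right (by positivity), List.foldl_append]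
    have hget : ∀ j : Int, 0 ≤ j → j < (ys.length : Int) →
        PySem.List.pyGetD (ys ++ [c]) j 0 = PySem.List.pyGetD ys j 0 := by
      intro j h0 hj
      rw [PySem.List.pyGetD_eq_getElem (ys ++ [c]) 0 h0 (by simp; omega),
          PySem.List.pyGetD_eq_getElem ys 0 h0 (by exact_mod_cast hj)]
      rw [List.getElem_append_left]
    have hcongr : (PySem.List.pyRange 0 (ys.length : Int) 1).foldl (fun nl j =>
        if j % 2 == 0 then
          (PySem.List.pyRange 0 (PySem.List.pyGetD (ys ++ [c]) j 0) 1).foldl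
            (fun l _ => l ++ [(0 : Int)]) nl
        else
          (PySem.List.pyRange 0 (PySem.List.pyGetD (ys ++ [c]) j 0) 1).foldl
            (fun l _ => l ++ [(1 : Int)]) nl) []
        = rleSpec ys 0 := by
      rw [← ih]
      apply PySem.List.foldl_congr_mem
      intro acc j hj
      rw [PySem.List.mem_pyRange_one] at hj
      rw [hget j hj.1 hj.2]
    simp only [List.foldl_cons, List.foldl_nil, hcongr]
    have hlast : PySem.List.pyGetD (ys ++ [c]) (ys.length : Int) 0 = c := by
      rw [PySem.List.pyGetD_eq_getElem (ys ++ [c]) 0 (by positivity) (by simp)]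
      simp
    rw [hlast, rleSpec_append_singleton]
    by_cases h : ys.length % 2 = 0
    · have : ((ys.length : Int)) % 2 == 0 := by
        simp; omega
      simp only [this, if_true, h, innerA_eq]
    · have : (((ys.length : Int)) % 2 == 0) = false := by
        simp; omega
      simp only [this, Bool.false_eq_true, if_false, h, innerA_eq]
      norm_num

-- B's zipped pair fold also computes rleSpec row 0.
theorem rowB_eq (row : List Int) :
    ((pyEvens row).zip (pyOdds row ++ [(0 : Int)])).foldl
      (fun out p => out ++ (List.replicate p.1.toNat 0 ++ List.replicate p.2.toNat 1)) []
      = rleSpec row 0 := by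
  induction row using pyEvens.induct with
  | case1 => simp [pyEvens, pyOdds, rleSpec]
  | case2 c => simp [pyEvens, pyOdds, rleSpec]
  | case3 c0 c1 r ih =>
    rw [PySem.List.foldl_append_eq_flatMap] at ih ⊢
    simp only [pyEvens, pyOdds, List.cons_append, List.zip_cons_cons, List.flatMap_cons,
      List.nil_append] at ih ⊢
    rw [ih]
    show _ = rleSpec (c0 :: c1 :: r) 0
    simp [rleSpec]

-- ===== VERDICT (by name: the statement is the Claim_ definition above) =====
theorem decompress_img_spec : Claim_equal_decompress_img := by
  intro ci _
  unfold Spec_decompress_img decompress_img decompress_img_alt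
  simp only [pyListEqIntZero, Bool.false_eq_true, if_false]
  rw [PySem.List.foldl_pyRange_zero_pyGetD' ci [] (fun acc row =>
    acc ++ [(PySem.List.pyRange 0 (row.length : Int) 1).foldl (fun nl j =>
        if j % 2 == 0 then
          (PySem.List.pyRange 0 (PySem.List.pyGetD row j 0) 1).foldl
            (fun l _ => l ++ [(0 : Int)]) nl
        else
          (PySem.List.pyRange 0 (PySem.List.pyGetD row j 0) 1).foldl
            (fun l _ => l ++ [(1 : Int)]) nl) []]) []]
  rw [PySem.List.foldl_append_singleton_eq_map]
  simp only [List.nil_append]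
  apply List.map_congr_left
  intro row _
  rw [rowA_eq, rowB_eq]
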